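-- pv_equiv track=rewrite | github.com/matbun/ML4Fires | experiments.py | categorize_exp
-- ===== SOURCE A (Python) =====
-- from typing import List, Tuple
--
-- def categorize_exp(experiments:List[dict]) -> Tuple[List[dict], List[dict], List[dict]]:
-- 	"""
-- 		Categorizes experiments by base filter dimension.
-- 	"""
-- 	bdim16, bdim32, bdim64 = [], [], []
-- 	for exp in experiments:
-- 		if exp["base_filter_dim"] == 16:
-- 			bdim16.append(exp)
-- 		elif exp["base_filter_dim"] == 32:
-- 			bdim32.append(exp)
-- 		elif exp["base_filter_dim"] == 64:
-- 			bdim64.append(exp)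
--
-- 	return bdim16, bdim32, bdim64
-- ===== SOURCE B (Python) =====
-- def categorize_exp(experiments):
-- 	"""
-- 		Categorizes experiments by base filter dimension.
-- 	"""
-- 	def bucket(dim):
-- 		return [exp for exp in experiments if exp["base_filter_dim"] == dim]
-- 	return bucket(16), bucket(32), bucket(64)
-- ===== Notes on version B (the rewrite author's own statement) =====
-- stated objective: simpler
-- what changed: Replaces A's single pass with three named accumulators and a three-way elif dispatch by three independent staged filter passes (one comprehension per dimension), with no mutable accumulator at all.
import Mathlib
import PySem

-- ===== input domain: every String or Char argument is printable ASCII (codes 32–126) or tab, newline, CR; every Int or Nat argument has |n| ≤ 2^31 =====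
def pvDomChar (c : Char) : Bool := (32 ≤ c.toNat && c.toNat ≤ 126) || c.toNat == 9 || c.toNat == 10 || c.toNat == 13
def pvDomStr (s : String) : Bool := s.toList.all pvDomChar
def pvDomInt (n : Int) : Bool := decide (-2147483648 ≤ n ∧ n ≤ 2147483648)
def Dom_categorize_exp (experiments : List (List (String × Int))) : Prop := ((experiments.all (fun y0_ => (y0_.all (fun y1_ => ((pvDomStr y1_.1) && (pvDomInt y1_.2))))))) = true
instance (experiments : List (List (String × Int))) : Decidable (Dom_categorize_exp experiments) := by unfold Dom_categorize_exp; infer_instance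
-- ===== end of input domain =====

-- B replaces A's single accumulating pass with three-way elif dispatch by three
-- independent filter passes, one per dimension (simpler; same O(n) cost).

-- ===== PORT A =====
-- exp["base_filter_dim"] (first-match lookup on the assoc list); 0 stands for the KeyError
-- case, which Pre_ excludes.
def pvKey (e : List (String × Int)) : Int :=
  (PySem.Dict.mk e).getD "base_filter_dim" 0

def categorize_exp (experiments : List (List (String × Int))) : (List (List (String × Int))) × (List (List (String × Int))) × (List (List (String × Int))) :=
  experiments.foldl
    (fun acc e =>
      if pvKey e == 16 then (acc.1 ++ [e], acc.2.1, acc.2.2)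
      else if pvKey e == 32 then (acc.1, acc.2.1 ++ [e], acc.2.2)
      else if pvKey e == 64 then (acc.1, acc.2.1, acc.2.2 ++ [e])
      else acc)
    ([], [], [])

-- ===== PORT B =====
-- bucket(dim) = [exp for exp in experiments if exp["base_filter_dim"] == dim]
def pvBucket (experiments : List (List (String × Int))) (dim : Int) : List (List (String × Int)) :=
  experiments.filter (fun e => pvKey e == dim)

def categorize_exp_alt (experiments : List (List (String × Int))) : (List (List (String × Int))) × (List (List (String × Int))) × (List (List (String × Int))) :=
  (pvBucket experiments 16, pvBucket experiments 32, pvBucket experiments 64)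

-- ===== PRECONDITION & SPEC =====
-- Pre_ excludes exactly the inputs where some experiment lacks the "base_filter_dim" key,
-- on which Python A (and B) raise KeyError.
def Pre_categorize_exp (experiments : List (List (String × Int))) : Prop :=
  (experiments.all (fun e => (PySem.Dict.mk e).contains "base_filter_dim")) = true
instance (experiments : List (List (String × Int))) : Decidable (Pre_categorize_exp experiments) := by unfold Pre_categorize_exp; infer_instance

def pvWitness_categorize_exp : (List (List (String × Int))) :=
  [[("base_filter_dim", 16)], [("base_filter_dim", 64)], [("base_filter_dim", 32), ("lr", 3)]]

def Spec_categorize_exp (experiments : List (List (String × Int))) (out : (List (List (String × Int))) × (List (List (String × Int))) × (List (List (String × Int)))) : Prop := out = categorize_exp_alt experiments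
instance (experiments : List (List (String × Int))) (out : (List (List (String × Int))) × (List (List (String × Int))) × (List (List (String × Int)))) : Decidable (Spec_categorize_exp experiments out) := by unfold Spec_categorize_exp; infer_instance

-- ===== CLAIM (what is proved, stated in full; the proofs are below) =====
def Claim_equal_categorize_exp : Prop := ∀ (experiments : List (List (String × Int))), Dom_categorize_exp experiments → Pre_categorize_exp experiments → Spec_categorize_exp experiments (categorize_exp experiments)

-- ===== LEMMAS AND PROOFS =====

-- A's loop starting from any accumulator appends the three filtered sublists.
lemma foldA_eq (l : List (List (String × Int)))
    (acc : (List (List (String × Int))) × (List (List (String × Int))) × (List (List (String × Int)))) :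
    l.foldl
      (fun acc e =>
        if pvKey e == 16 then (acc.1 ++ [e], acc.2.1, acc.2.2)
        else if pvKey e == 32 then (acc.1, acc.2.1 ++ [e], acc.2.2)
        else if pvKey e == 64 then (acc.1, acc.2.1, acc.2.2 ++ [e])
        else acc)
      acc
    = (acc.1 ++ l.filter (fun e => pvKey e == 16),
       acc.2.1 ++ l.filter (fun e => pvKey e == 32),
       acc.2.2 ++ l.filter (fun e => pvKey e == 64)) := by
  induction l generalizing acc with
  | nil => simp
  | cons e t ih =>
      simp only [List.foldl_cons, List.filter_cons]
      rw [ih]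
      by_cases h16 : pvKey e = 16
      · simp [h16]
      · by_cases h32 : pvKey e = 32
        · simp [h32]
        · by_cases h64 : pvKey e = 64
          · simp [h32, h64]
          · simp [h16, h32, h64]

-- ===== VERDICT (by name: the statement is the Claim_ definition above) =====
theorem categorize_exp_spec : Claim_equal_categorize_exp := by
  intro experiments _ _
  unfold Spec_categorize_exp categorize_exp categorize_exp_alt pvBucket
  rw [foldA_eq]
  simp
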